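-- pv_equiv track=rewrite | github.com/ricosr/retrieval_chatbot | retrieval_documents.py | find_max_min_length
-- ===== SOURCE A (Python) =====
-- def find_max_min_length(words_ls):
--     max_length = 0
--     max_count = 0
--     min_length = 100
--     min_count = 0
--     for each_word in words_ls:
--         if len(each_word) == max_length:
--             max_count += 1
--         if len(each_word) == min_length:
--             min_count += 1
--         if len(each_word) > max_length:
--             max_length = len(each_word)
--             max_count = 1
--         if len(each_word) < min_length:
--             min_length = len(each_word)
--             min_count = 1
--     return (max_length, max_count), (min_length, min_count)
-- ===== SOURCE B (Python) =====
-- def find_max_min_length(words_ls):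
--     lengths = [len(w) for w in words_ls]
--     max_length = max([0] + lengths)
--     min_length = min([100] + lengths)
--     return ((max_length, lengths.count(max_length)),
--             (min_length, lengths.count(min_length)))
-- ===== Notes on version B (the rewrite author's own statement) =====
-- stated objective: idiomatic
-- what changed: Replaces the single four-accumulator scan with a build-the-lengths-list-then-scan decomposition: compute all lengths once, take max/min with the original 0/100 sentinels via the builtins, and obtain the counts with list.count.
import Mathlib
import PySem

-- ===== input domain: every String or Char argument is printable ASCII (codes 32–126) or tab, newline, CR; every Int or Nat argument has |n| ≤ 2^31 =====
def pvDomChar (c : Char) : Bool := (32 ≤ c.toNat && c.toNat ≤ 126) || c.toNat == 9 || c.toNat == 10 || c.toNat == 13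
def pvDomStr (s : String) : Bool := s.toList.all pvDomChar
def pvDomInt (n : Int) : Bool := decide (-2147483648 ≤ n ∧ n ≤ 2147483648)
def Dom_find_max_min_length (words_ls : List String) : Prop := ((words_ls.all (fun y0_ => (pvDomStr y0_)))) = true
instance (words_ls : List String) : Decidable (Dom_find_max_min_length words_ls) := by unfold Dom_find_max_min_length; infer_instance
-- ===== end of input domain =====

-- B replaces A's single four-accumulator loop by computing the lengths list once and
-- reading max/min (with A's 0/100 sentinels) and the counts off that list (idiomatic; same cost).

-- ===== PORT A =====
def pvLoopA : List String → Int → Int → Int → Int → (Int × Int) × (Int × Int)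
  | [], maxL, maxC, minL, minC => ((maxL, maxC), (minL, minC))
  | w :: rest, maxL, maxC, minL, minC =>
    let L := PySem.Str.len w
    let maxC1 := if L = maxL then maxC + 1 else maxC
    let minC1 := if L = minL then minC + 1 else minC
    let maxL2 := if L > maxL then L else maxL
    let maxC2 := if L > maxL then 1 else maxC1
    let minL2 := if L < minL then L else minL
    let minC2 := if L < minL then 1 else minC1
    pvLoopA rest maxL2 maxC2 minL2 minC2

def find_max_min_length (words_ls : List String) : (Int × Int) × (Int × Int) :=
  pvLoopA words_ls 0 0 100 0

-- ===== PORT B =====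
def find_max_min_length_alt (words_ls : List String) : (Int × Int) × (Int × Int) :=
  let lengths := words_ls.map (fun w => PySem.Str.len w)
  let max_length := (PySem.List.max? ((0 : Int) :: lengths) (fun y => y)).getD 0
  let min_length := (PySem.List.min? ((100 : Int) :: lengths) (fun y => y)).getD 0
  ((max_length, (PySem.List.count lengths max_length : Int)),
   (min_length, (PySem.List.count lengths min_length : Int)))

-- ===== PRECONDITION & SPEC =====
def Spec_find_max_min_length (words_ls : List String) (out : (Int × Int) × (Int × Int)) : Prop := out = find_max_min_length_alt words_ls
instance (words_ls : List String) (out : (Int × Int) × (Int × Int)) : Decidable (Spec_find_max_min_length words_ls out) := by unfold Spec_find_max_min_length; infer_instance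

-- ===== CLAIM (what is proved, stated in full; the proofs are below) =====
def Claim_equal_find_max_min_length : Prop := ∀ (words_ls : List String), Dom_find_max_min_length words_ls → Spec_find_max_min_length words_ls (find_max_min_length words_ls)

-- ===== LEMMAS AND PROOFS =====

-- proof-only helpers: the two independent halves of A's loop, over the length list
def pvLoopMax : List Int → Int → Int → Int × Int
  | [], M, C => (M, C)
  | L :: t, M, C =>
    let C1 := if L = M then C + 1 else C
    pvLoopMax t (if L > M then L else M) (if L > M then 1 else C1)

def pvLoopMin : List Int → Int → Int → Int × Int
  | [], m, c => (m, c)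
  | L :: t, m, c =>
    let c1 := if L = m then c + 1 else c
    pvLoopMin t (if L < m then L else m) (if L < m then 1 else c1)

theorem pvLoopA_split (ws : List String) : ∀ (M C m c : Int),
    pvLoopA ws M C m c =
      (pvLoopMax (ws.map PySem.Str.len) M C, pvLoopMin (ws.map PySem.Str.len) m c) := by
  induction ws with
  | nil => intro M C m c; rfl
  | cons w rest ih =>
    intro M C m c
    simp only [pvLoopA, List.map_cons, pvLoopMax, pvLoopMin]
    exact ih _ _ _ _

theorem pvLoopMax_eq (t : List Int) : ∀ (M C : Int),
    pvLoopMax t M C =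
      (t.foldl max M, (if t.foldl max M = M then C else 0) + (t.count (t.foldl max M) : Int)) := by
  induction t with
  | nil => intro M C; simp [pvLoopMax]
  | cons L t ih =>
    intro M C
    have hmax : (if M < L then L else M) = max M L := by rw [max_def]; split_ifs <;> omega
    simp only [pvLoopMax, List.foldl_cons, gt_iff_lt, hmax, ih, Prod.mk.injEq]
    refine ⟨trivial, ?_⟩
    have hFM : max M L ≤ t.foldl max (max M L) := (PySem.List.le_foldl_max t (max M L)).1
    rw [List.count_cons]
    simp only [beq_iff_eq]
    have h1 : L ≤ t.foldl max (max M L) := le_trans (le_max_right M L) hFM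
    have h2 : M ≤ t.foldl max (max M L) := le_trans (le_max_left M L) hFM
    push_cast
    split_ifs <;> omega

theorem pvLoopMin_eq (t : List Int) : ∀ (m c : Int),
    pvLoopMin t m c =
      (t.foldl min m, (if t.foldl min m = m then c else 0) + (t.count (t.foldl min m) : Int)) := by
  induction t with
  | nil => intro m c; simp [pvLoopMin]
  | cons L t ih =>
    intro m c
    have hmin : (if L < m then L else m) = min m L := by rw [min_def]; split_ifs <;> omega
    simp only [pvLoopMin, List.foldl_cons, hmin, ih, Prod.mk.injEq]
    refine ⟨trivial, ?_⟩
    have hFm : t.foldl min (min m L) ≤ min m L := (PySem.List.foldl_min_le t (min m L)).1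
    rw [List.count_cons]
    simp only [beq_iff_eq]
    have h1 : t.foldl min (min m L) ≤ L := le_trans hFm (min_le_right m L)
    have h2 : t.foldl min (min m L) ≤ m := le_trans hFm (min_le_left m L)
    push_cast
    split_ifs <;> omega

-- ===== VERDICT (by name: the statement is the Claim_ definition above) =====
theorem find_max_min_length_spec : Claim_equal_find_max_min_length := by
  intro ws _
  unfold Spec_find_max_min_length find_max_min_length find_max_min_length_alt
  rw [pvLoopA_split, pvLoopMax_eq, pvLoopMin_eq]
  simp only [PySem.List.max?_id_cons, PySem.List.min?_id_cons, Option.getD_some,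
    PySem.List.count_eq, ite_self, zero_add]
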